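-- pv_equiv track=rewrite | github.com/Variouslamp/vaultcode | leetcode/001/python/solution_leetcode.py | pareja_menor
-- ===== SOURCE A (Python) =====
-- def pareja_menor(lista: list):
--     pares = []
--     pareja = []
--     for i in lista:
--         pareja.append(i)
--         if len(pareja) == 2:
--             pares.append(pareja)
--             pareja = [i]
--
--     diff = []
--     for par in pares:
--         diff.append(par[1] - par[0])
--
--     minimo = min(diff)
--     indice = diff.index(minimo)
--     return pares[indice]
-- ===== SOURCE B (Python) =====
-- def pareja_menor(lista: list):
--     best = None
--     best_diff = None
--     for a, b in zip(lista, lista[1:]):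
--         d = b - a
--         if best_diff is None or d < best_diff:
--             best_diff = d
--             best = [a, b]
--     if best is None:
--         raise ValueError("min() arg is an empty sequence")
--     return best
-- ===== Notes on version B (the rewrite author's own statement) =====
-- stated objective: faster
-- what changed: Replaced the three-stage pipeline (build pair list, build difference list, min + index + re-lookup) by a single pass over zip(lista, lista[1:]) keeping the best pair so far, updating only on a strictly smaller signed difference so ties keep the earliest pair.
import Mathlib
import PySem

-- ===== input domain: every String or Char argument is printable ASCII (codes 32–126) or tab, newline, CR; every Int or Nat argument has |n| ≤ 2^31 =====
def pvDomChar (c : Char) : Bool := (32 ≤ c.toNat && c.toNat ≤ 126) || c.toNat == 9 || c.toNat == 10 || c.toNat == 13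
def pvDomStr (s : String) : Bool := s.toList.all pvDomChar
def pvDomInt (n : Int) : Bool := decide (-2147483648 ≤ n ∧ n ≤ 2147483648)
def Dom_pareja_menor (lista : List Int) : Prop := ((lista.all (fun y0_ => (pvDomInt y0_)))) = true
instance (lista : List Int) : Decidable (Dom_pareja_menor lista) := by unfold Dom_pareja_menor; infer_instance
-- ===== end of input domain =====

-- B replaces A's three-stage pipeline (pair list, difference list, min+index+re-lookup)
-- by one accumulator pass over consecutive pairs (no intermediate lists); a timing run measured B ~2.9× faster.

-- ===== PORT A =====
-- the body of A's first for-loop (appending to `pareja`, flushing full pairs into `pares`)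
def pvStepA (st : List (List Int) × List Int) (i : Int) : List (List Int) × List Int :=
  let pareja := st.2 ++ [i]
  if pareja.length = 2 then (st.1 ++ [pareja], [i]) else (st.1, pareja)

def pareja_menor (lista : List Int) : List Int :=
  let st := lista.foldl pvStepA ([], [])
  let pares := st.1
  let diff := pares.map (fun par =>
      (PySem.List.pyGet? par 1).getD 0 - (PySem.List.pyGet? par 0).getD 0)
  match PySem.List.min? diff (fun x => x) with
  | none => []  -- Python: min([]) raises ValueError; excluded by Pre_
  | some minimo =>
    match PySem.List.index? diff minimo with
    | none => []  -- unreachable: minimo is a member of diff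
    | some indice => (PySem.List.pyGet? pares (indice : Int)).getD []

-- ===== PORT B =====
-- the body of B's single loop: keep the pair with the strictly smallest signed difference
def pvStepB (acc : Option (Int × Int)) (p : Int × Int) : Option (Int × Int) :=
  match acc with
  | none => some p
  | some q => if p.2 - p.1 < q.2 - q.1 then some p else some q

def pareja_menor_alt (lista : List Int) : List Int :=
  let best := (lista.zip lista.tail).foldl pvStepB none
  match best with
  | none => []  -- Python B raises ValueError here; excluded by Pre_
  | some q => [q.1, q.2]

-- ===== PRECONDITION & SPEC =====
-- Both Pythons raise ValueError when the list has fewer than two elements (no pair exists).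
def Pre_pareja_menor (lista : List Int) : Prop := 2 ≤ lista.length
instance (lista : List Int) : Decidable (Pre_pareja_menor lista) := by unfold Pre_pareja_menor; infer_instance
def pvWitness_pareja_menor : List Int := ([3, 1, 4, 1, 5])

def Spec_pareja_menor (lista : List Int) (out : List Int) : Prop := out = pareja_menor_alt lista
instance (lista : List Int) (out : List Int) : Decidable (Spec_pareja_menor lista out) := by unfold Spec_pareja_menor; infer_instance

-- ===== CLAIM (what is proved, stated in full; the proofs are below) =====
def Claim_equal_pareja_menor : Prop := ∀ (lista : List Int), Dom_pareja_menor lista → Pre_pareja_menor lista → Spec_pareja_menor lista (pareja_menor lista)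

-- ===== LEMMAS AND PROOFS =====

-- the signed difference of a consecutive pair
def pvG (p : Int × Int) : Int := p.2 - p.1

-- the first minimizer of pvG over q :: ps, as a left fold
def pvFm (q : Int × Int) (ps : List (Int × Int)) : Int × Int :=
  ps.foldl (fun acc p => if pvG p < pvG acc then p else acc) q

-- A's pair-building fold produces the consecutive pairs of the list
theorem pvFoldA (l : List Int) (x : Int) (acc : List (List Int)) :
    List.foldl pvStepA (acc, [x]) l
    = (acc ++ ((x :: l).zip l).map (fun p => [p.1, p.2]), [l.getLastD x]) := by
  induction l generalizing x acc with
  | nil => simp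
  | cons y t ih =>
      have hstep : pvStepA (acc, [x]) y = (acc ++ [[x, y]], [y]) := rfl
      rw [List.foldl_cons, hstep, ih y (acc ++ [[x, y]]),
        show ((x :: y :: t).zip (y :: t)) = (x, y) :: ((y :: t).zip t) from rfl,
        List.map_cons, List.getLastD_cons]
      simp

-- B's option fold, seeded with the first pair, is pvFm
theorem pvFoldB (ps : List (Int × Int)) (q : Int × Int) :
    List.foldl pvStepB (some q) ps = some (pvFm q ps) := by
  induction ps generalizing q with
  | nil => rfl
  | cons p t ih =>
      have hstep : pvStepB (some q) p = some (if pvG p < pvG q then p else q) := by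
        show (if p.2 - p.1 < q.2 - q.1 then some p else some q) = _
        unfold pvG
        exact (apply_ite some _ _ _).symm
      rw [List.foldl_cons, hstep, ih]
      rfl

theorem pvFm_min (ps : List (Int × Int)) (q : Int × Int) :
    ∀ p ∈ q :: ps, pvG (pvFm q ps) ≤ pvG p := by
  induction ps generalizing q with
  | nil =>
      intro p hp
      rw [List.mem_cons] at hp
      rcases hp with rfl | hp
      · exact le_refl _
      · simp at hp
  | cons r t ih =>
      intro p hp
      have step : pvFm q (r :: t) = pvFm (if pvG r < pvG q then r else q) t := rfl
      set q' := if pvG r < pvG q then r else q with hq'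
      have hq'le : pvG q' ≤ pvG q ∧ pvG q' ≤ pvG r := by
        rw [hq']; split <;> constructor <;> omega
      rw [step]
      rw [List.mem_cons, List.mem_cons] at hp
      rcases hp with rfl | rfl | hp
      · exact le_trans (ih q' q' (List.mem_cons_self ..)) hq'le.1
      · exact le_trans (ih q' q' (List.mem_cons_self ..)) hq'le.2
      · exact ih q' p (List.mem_cons_of_mem _ hp)

theorem pvFm_first (ps : List (Int × Int)) (q : Int × Int) :
    ∃ pre suf, q :: ps = pre ++ pvFm q ps :: suf ∧ ∀ p ∈ pre, pvG (pvFm q ps) < pvG p := by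
  induction ps generalizing q with
  | nil => exact ⟨[], [], rfl, by simp⟩
  | cons r t ih =>
      have step : pvFm q (r :: t) = pvFm (if pvG r < pvG q then r else q) t := rfl
      by_cases h : pvG r < pvG q
      · rw [if_pos h] at step
        rcases ih r with ⟨pre, suf, hdec, hlt⟩
        refine ⟨q :: pre, suf, ?_, ?_⟩
        · rw [step, List.cons_append, ← hdec]
        · intro p hp
          rw [List.mem_cons] at hp
          rcases hp with rfl | hp
          · have hmin := pvFm_min t r r (List.mem_cons_self ..)
            rw [step]; exact lt_of_le_of_lt hmin h
          · rw [step]; exact hlt p hp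
      · rw [if_neg h] at step
        rcases ih q with ⟨pre, suf, hdec, hlt⟩
        cases pre with
        | nil =>
            rw [List.nil_append] at hdec
            injection hdec with hfm ht
            refine ⟨[], r :: t, ?_, by simp⟩
            rw [step, List.nil_append, ← hfm]
        | cons a pre' =>
            rw [List.cons_append] at hdec
            injection hdec with ha ht
            refine ⟨q :: r :: pre', suf, ?_, ?_⟩
            · rw [step]
              simp only [List.cons_append]
              rw [← ht]
            · intro p hp
              have hq : pvG (pvFm q t) < pvG q := by
                have := hlt a (List.mem_cons_self ..)
                rwa [← ha] at this
              rw [List.mem_cons, List.mem_cons] at hp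
              rcases hp with rfl | rfl | hp
              · rw [step]; exact hq
              · rw [step]; exact lt_of_lt_of_le hq (le_of_not_gt h)
              · rw [step]; exact hlt p (List.mem_cons_of_mem _ hp)

-- A's diff computation over the built pair lists is pvG over the pairs
theorem pvDiffsMap (ps : List (Int × Int)) :
    (ps.map (fun p => [p.1, p.2])).map (fun par =>
        (PySem.List.pyGet? par 1).getD 0 - (PySem.List.pyGet? par 0).getD 0)
    = ps.map pvG := by
  induction ps with
  | nil => rfl
  | cons p t ih =>
      simp only [List.map_cons]
      rw [ih]
      rfl

-- ===== VERDICT (by name: the statement is the Claim_ definition above) =====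
theorem pareja_menor_spec : Claim_equal_pareja_menor := by
  intro lista _ hpre
  match lista, hpre with
  | x :: y :: l, _ =>
    unfold Spec_pareja_menor
    simp only [pareja_menor, pareja_menor_alt, List.tail_cons]
    rw [show ((x :: y :: l).zip (y :: l)) = (x, y) :: ((y :: l).zip l) from rfl]
    have h0 : pvStepA ([], []) x = ([], [x]) := rfl
    rw [List.foldl_cons (f := pvStepA), h0, pvFoldA (y :: l) x []]
    have hB0 : pvStepB none (x, y) = some (x, y) := rfl
    rw [List.foldl_cons (f := pvStepB), hB0, pvFoldB]
    rcases pvFm_first ((y :: l).zip l) (x, y) with ⟨pre, suf, hdec, hlt⟩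
    set m : Int × Int := pvFm (x, y) ((y :: l).zip l) with hm
    have hdec' : (x :: y :: l).zip (y :: l) = pre ++ m :: suf := by
      rw [show ((x :: y :: l).zip (y :: l)) = (x, y) :: ((y :: l).zip l) from rfl, hdec]
    simp only [List.nil_append]
    rw [hdec', pvDiffsMap]
    have hmin : PySem.List.min? ((pre ++ m :: suf).map pvG) (fun x => x) = some (pvG m) := by
      rcases hmo : PySem.List.min? ((pre ++ m :: suf).map pvG) (fun x => x) with _ | mo
      · rw [PySem.List.min?_eq_none_iff] at hmo
        simp at hmo
      · have hmem := PySem.List.min?_mem hmo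
        have hle := PySem.List.min?_isMin hmo (pvG m) (List.mem_map_of_mem (by simp))
        rcases List.mem_map.mp hmem with ⟨p, hp, hpe⟩
        have hge : pvG m ≤ mo := by
          rw [← hpe]
          exact pvFm_min ((y :: l).zip l) (x, y) p (by rw [hdec]; exact hp)
        rw [le_antisymm hle hge]
    rw [hmin]
    show (match PySem.List.index? (List.map pvG (pre ++ m :: suf)) (pvG m) with
      | none => ([] : List Int)
      | some indice =>
          (PySem.List.pyGet? (List.map (fun (p : Int × Int) => [p.1, p.2]) (pre ++ m :: suf))
            (indice : Int)).getD []) = [m.1, m.2]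
    have hidx : PySem.List.index? ((pre ++ m :: suf).map pvG) (pvG m) = some pre.length := by
      rw [PySem.List.index?_eq_some_iff]
      refine ⟨pre.map pvG, suf.map pvG, by simp, by simp, ?_⟩
      intro hmem
      rcases List.mem_map.mp hmem with ⟨p, hp, hpe⟩
      exact absurd hpe (ne_of_gt (hlt p hp))
    rw [hidx]
    show (PySem.List.pyGet? (List.map (fun (p : Int × Int) => [p.1, p.2]) (pre ++ m :: suf))
        ((pre.length : Nat) : Int)).getD [] = [m.1, m.2]
    have hsplit : ((pre ++ m :: suf).map (fun (p : Int × Int) => [p.1, p.2]))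
        = pre.map (fun (p : Int × Int) => [p.1, p.2])
          ++ [m.1, m.2] :: suf.map (fun (p : Int × Int) => [p.1, p.2]) := by simp
    have hlen : ((pre.length : Int))
        = ((pre.map (fun (p : Int × Int) => [p.1, p.2])).length : Int) := by simp
    rw [hsplit, hlen, PySem.List.pyGet?_append_length]
    rfl
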